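-- pv_equiv track=rewrite | github.com/SeoulBhin/contest | crawler/scrapers/dacon.py | _tokenize_args
-- ===== SOURCE A (Python) =====
-- def _tokenize_args(args_str: str) -> list[str]:
--     """IIFE 인자 문자열을 개별 값 토큰 리스트로 분리
--
--     예: '0,1,false,"hello",null' → ['0', '1', 'false', '"hello"', 'null']
--     문자열 내부의 쉼표와 중첩 괄호를 올바르게 처리.
--     """
--     tokens = []
--     current = []
--     depth = 0  # 괄호/대괄호/중괄호 깊이
--     in_string = False
--     string_char = None
--     i = 0
--
--     while i < len(args_str):
--         ch = args_str[i]
--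
--         if in_string:
--             current.append(ch)
--             if ch == "\\" and i + 1 < len(args_str):
--                 current.append(args_str[i + 1])
--                 i += 2
--                 continue
--             if ch == string_char:
--                 in_string = False
--         elif ch in ('"', "'"):
--             in_string = True
--             string_char = ch
--             current.append(ch)
--         elif ch in ("(", "[", "{"):
--             depth += 1
--             current.append(ch)
--         elif ch in (")", "]", "}"):
--             depth -= 1
--             current.append(ch)
--         elif ch == "," and depth == 0:
--             token = "".join(current).strip()
--             if token:
--                 # void 0 → null
--                 if token == "void 0":
--                     token = "null"
--                 tokens.append(token)
--             current = []
--         else: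
--             current.append(ch)
--
--         i += 1
--
--     # 마지막 토큰
--     token = "".join(current).strip()
--     if token:
--         if token == "void 0":
--             token = "null"
--         tokens.append(token)
--
--     return tokens
-- ===== SOURCE B (Python) =====
-- def _tokenize_args(args_str: str) -> list[str]:
--     """Two-phase: scan once recording top-level comma cut positions, then
--     slice args_str between cuts and post-process each slice."""
--     # Phase 1: find the cut positions (top-level commas) with the same
--     # depth/in-string/escape state machine, but no character buffer.
--     segs = []
--     start = 0
--     depth = 0
--     in_string = False
--     string_char = None
--     i = 0
--     n = len(args_str)
--     while i < n:
--         ch = args_str[i]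
--         if in_string:
--             if ch == "\\" and i + 1 < n:
--                 i += 2
--                 continue
--             if ch == string_char:
--                 in_string = False
--         elif ch in ('"', "'"):
--             in_string = True
--             string_char = ch
--         elif ch in ("(", "[", "{"):
--             depth += 1
--         elif ch in (")", "]", "}"):
--             depth -= 1
--         elif ch == "," and depth == 0:
--             segs.append(args_str[start:i])
--             start = i + 1
--         i += 1
--     segs.append(args_str[start:])
--     # Phase 2: strip each slice, drop empties, map 'void 0' to 'null'.
--     out = []
--     for seg in segs:
--         t = seg.strip()
--         if t:
--             out.append("null" if t == "void 0" else t)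
--     return out
-- ===== Notes on version B (the rewrite author's own statement) =====
-- stated objective: alternative
-- what changed: B replaces A's incremental character-buffer token builder with a two-phase shape: one buffer-free scan that records the slice boundaries at top-level commas, then a second pass slicing the string between boundaries and applying strip, empty-skip and the undefined-value replacement to each slice.
import Mathlib
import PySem

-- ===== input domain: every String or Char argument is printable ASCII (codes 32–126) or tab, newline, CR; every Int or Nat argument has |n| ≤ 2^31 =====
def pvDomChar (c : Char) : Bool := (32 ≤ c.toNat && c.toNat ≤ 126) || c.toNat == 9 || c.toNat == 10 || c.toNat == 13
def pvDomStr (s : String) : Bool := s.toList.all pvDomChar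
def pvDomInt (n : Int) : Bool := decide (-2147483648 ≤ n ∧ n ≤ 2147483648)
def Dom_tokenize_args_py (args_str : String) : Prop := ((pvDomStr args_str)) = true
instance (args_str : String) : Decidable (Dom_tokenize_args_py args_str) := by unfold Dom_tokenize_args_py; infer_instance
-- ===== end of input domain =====

-- B does the same tokenisation by recording slice boundaries in a buffer-free scan and
-- slicing/post-processing in a second phase, instead of A's incremental character buffer.
-- Return-value equivalence only; neither program mutates its argument.

-- ===== PORT A =====

-- token post-fix: 'void 0' → 'null'
def pvFixA (t : String) : String := if t = "void 0" then "null" else t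

-- A's while loop: cs is the unread suffix, cur the character buffer, tokens the output so far.
-- The escape rule (backslash inside a string consumes the following char) is the two-step case.
def pvLoopA : List Char → List Char → Int → Bool → Option Char → List String → List String
  | [], cur, _, _, _, tokens =>
      -- trailing token: "".join(current).strip(), skip if empty, 'void 0' → 'null'
      let token := String.ofList (PySem.Chars.strip cur)
      if token = "" then tokens else tokens ++ [pvFixA token]
  | ch :: rest, cur, depth, in_string, sc, tokens =>
      if in_string then
        if ch = '\\' then
          match rest with
          | c2 :: rest2 => pvLoopA rest2 (cur ++ [ch, c2]) depth in_string sc tokens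
          | [] => pvLoopA [] (cur ++ [ch]) depth (if sc = some ch then false else in_string) sc tokens
        else
          pvLoopA rest (cur ++ [ch]) depth (if sc = some ch then false else in_string) sc tokens
      else if ch = '"' ∨ ch = '\'' then
        pvLoopA rest (cur ++ [ch]) depth true (some ch) tokens
      else if ch = '(' ∨ ch = '[' ∨ ch = '{' then
        pvLoopA rest (cur ++ [ch]) (depth + 1) in_string sc tokens
      else if ch = ')' ∨ ch = ']' ∨ ch = '}' then
        pvLoopA rest (cur ++ [ch]) (depth - 1) in_string sc tokens
      else if ch = ',' ∧ depth = 0 then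
        let token := String.ofList (PySem.Chars.strip cur)
        let tokens' := if token = "" then tokens else tokens ++ [pvFixA token]
        pvLoopA rest [] depth in_string sc tokens'
      else
        pvLoopA rest (cur ++ [ch]) depth in_string sc tokens

def tokenize_args_py (args_str : String) : List String :=
  pvLoopA args_str.toList [] 0 false none []

-- ===== PORT B =====

-- Phase 1: the same state machine, but buffer-free; at each top-level comma it slices the
-- original string between the recorded start position and the comma.
-- args_str[start:i] with 0 ≤ start ≤ i is exactly (full.drop start).take (i - start).
def pvLoopB (full : List Char) : List Char → Nat → Nat → Int → Bool → Option Char → List (List Char)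
  | [], _, start, _, _, _ => [full.drop start]   -- segs.append(args_str[start:])
  | ch :: rest, i, start, depth, in_string, sc =>
      if in_string then
        if ch = '\\' then
          match rest with
          | _ :: rest2 => pvLoopB full rest2 (i + 2) start depth in_string sc
          | [] => pvLoopB full [] (i + 1) start depth (if sc = some ch then false else in_string) sc
        else
          pvLoopB full rest (i + 1) start depth (if sc = some ch then false else in_string) sc
      else if ch = '"' ∨ ch = '\'' then
        pvLoopB full rest (i + 1) start depth true (some ch)
      else if ch = '(' ∨ ch = '[' ∨ ch = '{' then
        pvLoopB full rest (i + 1) start (depth + 1) in_string sc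
      else if ch = ')' ∨ ch = ']' ∨ ch = '}' then
        pvLoopB full rest (i + 1) start (depth - 1) in_string sc
      else if ch = ',' ∧ depth = 0 then
        ((full.drop start).take (i - start)) :: pvLoopB full rest (i + 1) (i + 1) depth in_string sc
      else
        pvLoopB full rest (i + 1) start depth in_string sc

-- Phase 2: strip each slice, drop empties, apply the undefined-value replacement.
def pvPostB : List (List Char) → List String
  | [] => []
  | seg :: rest =>
      let t := String.ofList (PySem.Chars.strip seg)
      if t = "" then pvPostB rest else pvFixA t :: pvPostB rest

def tokenize_args_py_alt (args_str : String) : List String :=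
  pvPostB (pvLoopB args_str.toList args_str.toList 0 0 0 false none)

-- ===== PRECONDITION & SPEC =====
def Spec_tokenize_args_py (args_str : String) (out : List String) : Prop := out = tokenize_args_py_alt args_str
instance (args_str : String) (out : List String) : Decidable (Spec_tokenize_args_py args_str out) := by unfold Spec_tokenize_args_py; infer_instance

-- ===== CLAIM (what is proved, stated in full; the proofs are below) =====
def Claim_equal_tokenize_args_py : Prop := ∀ (args_str : String), Dom_tokenize_args_py args_str → Spec_tokenize_args_py args_str (tokenize_args_py args_str)

-- ===== LEMMAS AND PROOFS =====

-- appending the character at position i to the buffer extends the slice by one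
lemma pv_take_snoc (full : List Char) (start i : Nat) (ch : Char) (rest : List Char)
    (hd : full.drop i = ch :: rest) (hsi : start ≤ i) :
    (full.drop start).take (i - start) ++ [ch] = (full.drop start).take (i + 1 - start) := by
  have hget : full[i]? = some ch := by
    have := congrArg (·[0]?) hd
    simpa using this
  have h1 : i + 1 - start = (i - start) + 1 := by omega
  rw [h1, List.take_add_one]
  have : (full.drop start)[i - start]? = some ch := by
    rw [List.getElem?_drop]
    have : start + (i - start) = i := by omega
    rw [this, hget]
  simp [this]

lemma pv_drop_tail (full : List Char) (i : Nat) (ch : Char) (rest : List Char)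
    (hd : full.drop i = ch :: rest) : full.drop (i + 1) = rest := by
  have := congrArg (List.drop 1) hd
  simpa [List.drop_drop, Nat.add_comm] using this

-- main invariant: A's loop with buffer = tokens ++ post-processing of B's slice list
lemma pv_main (full : List Char) :
    ∀ n cs i start depth in_string sc tokens, cs.length ≤ n →
    cs = full.drop i → start ≤ i →
    pvLoopA cs ((full.drop start).take (i - start)) depth in_string sc tokens
      = tokens ++ pvPostB (pvLoopB full cs i start depth in_string sc) := by
  intro n
  induction n with
  | zero =>
    intro cs i start depth in_string sc tokens hn hcs hsi
    have : cs = [] := List.eq_nil_of_length_eq_zero (Nat.le_zero.mp hn)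
    subst this
    have hdrop : full.drop start = (full.drop start).take (i - start) := by
      refine (List.take_of_length_le ?_).symm
      have : full.length ≤ i := by
        by_contra h
        exact absurd (List.drop_eq_nil_iff.mp hcs.symm) (by omega)
      simp only [List.length_drop]; omega
    simp [pvLoopA, pvLoopB, pvPostB, ← hdrop]
    split <;> simp
  | succ n ih =>
    intro cs i start depth in_string sc tokens hn hcs hsi
    match cs with
    | [] =>
      have hdrop : full.drop start = (full.drop start).take (i - start) := by
        refine (List.take_of_length_le ?_).symm
        have : full.length ≤ i := by
          by_contra h
          exact absurd (List.drop_eq_nil_iff.mp hcs.symm) (by omega)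
        simp only [List.length_drop]; omega
      simp [pvLoopA, pvLoopB, pvPostB, ← hdrop]
      split <;> simp
    | ch :: rest =>
      have hrest : full.drop (i + 1) = rest := pv_drop_tail full i ch rest hcs.symm
      have hsnoc := pv_take_snoc full start i ch rest hcs.symm hsi
      have hlen : rest.length ≤ n := by simpa using hn
      rw [pvLoopA.eq_def, pvLoopB.eq_def]; simp only []
      by_cases hin : in_string = true
      · subst hin
        by_cases hbs : ch = '\\'
        · subst hbs
          cases rest with
          | nil =>
            simp only []
            rw [hsnoc]
            exact ih [] (i+1) start depth (if sc = some '\\' then false else true) sc tokens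
              (by simp) (by rw [hrest]) (by omega)
          | cons c2 rest2 =>
            simp only []
            have hrest2 : full.drop (i + 2) = rest2 := by
              have := pv_drop_tail full (i+1) c2 rest2 hrest
              simpa [Nat.add_assoc] using this
            have hsnoc2 := pv_take_snoc full start (i+1) c2 rest2 hrest (by omega)
            have hchain : ((full.drop start).take (i - start)) ++ ['\\', c2]
                = (full.drop start).take (i + 2 - start) := by
              have h3 : ((full.drop start).take (i - start)) ++ ['\\', c2]
                  = (((full.drop start).take (i - start)) ++ ['\\']) ++ [c2] := by simp
              rw [h3, hsnoc]
              simpa [Nat.add_assoc] using hsnoc2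
            rw [hchain]
            exact ih rest2 (i+2) start depth true sc tokens
              (by simp at hlen; omega) hrest2.symm (by omega)
        · simp only [if_neg hbs]
          rw [hsnoc]
          exact ih rest (i+1) start depth _ sc tokens hlen hrest.symm (by omega)
      · have hin' : in_string = false := by simpa using hin
        subst hin'
        simp only [if_neg (by simp : ¬ (false = true))]
        split
        · rw [hsnoc]; exact ih rest (i+1) start depth _ _ tokens hlen hrest.symm (by omega)
        · split
          · rw [hsnoc]; exact ih rest (i+1) start _ _ sc tokens hlen hrest.symm (by omega)
          · split
            · rw [hsnoc]; exact ih rest (i+1) start _ _ sc tokens hlen hrest.symm (by omega)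
            · split
              · -- top-level comma: A emits the buffered token, B records the slice
                have hih := ih rest (i+1) (i+1) depth false sc
                  (if String.ofList (PySem.Chars.strip ((full.drop start).take (i - start))) = ""
                     then tokens
                     else tokens ++ [pvFixA (String.ofList (PySem.Chars.strip ((full.drop start).take (i - start))))])
                  hlen hrest.symm (by omega)
                have hzero : (full.drop (i+1)).take ((i+1) - (i+1)) = ([] : List Char) := by simp
                rw [show ((i+1) - (i+1)) = 0 from by omega] at hih
                simp only [List.take_zero] at hih
                rw [hih, pvPostB]
                split <;> simp
              · rw [hsnoc]; exact ih rest (i+1) start depth _ sc tokens hlen hrest.symm (by omega)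

-- ===== VERDICT (by name: the statement is the Claim_ definition above) =====
theorem tokenize_args_py_spec : Claim_equal_tokenize_args_py := by
  intro s _
  unfold Spec_tokenize_args_py tokenize_args_py tokenize_args_py_alt
  have := pv_main s.toList s.toList.length s.toList 0 0 0 false none [] (le_refl _) (by simp) (by omega)
  simpa using this
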